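-- pv_equiv track=rewrite | github.com/Stervar/Calculator-Terminal | kivy-calculator.py | preprocess_expression
-- ===== SOURCE A (Python) =====
-- def preprocess_expression(expression):
--     expression = expression.replace('^', '**')
--     new_expression = ""
--     for i, char in enumerate(expression):
--         if char == '(' and i > 0 and expression[i - 1].isdigit():
--             new_expression += '*'
--         new_expression += char
--     return new_expression
-- ===== SOURCE B (Python) =====
-- def preprocess_expression(expression):
--     parts = expression.replace('^', '**').split('(')
--     out = parts[0]
--     for p in parts[1:]:
--         out += ('*(' if out and out[-1].isdigit() else '(') + p
--     return out
-- ===== Notes on version B (the rewrite author's own statement) =====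
-- stated objective: faster
-- what changed: Instead of A's per-character enumerate loop with an index look-back and character-by-character concatenation, B splits the string on the open-paren delimiter and rebuilds it with a fold over the parts, inserting the multiplication sign when the accumulated output ends in a digit.
import Mathlib
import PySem

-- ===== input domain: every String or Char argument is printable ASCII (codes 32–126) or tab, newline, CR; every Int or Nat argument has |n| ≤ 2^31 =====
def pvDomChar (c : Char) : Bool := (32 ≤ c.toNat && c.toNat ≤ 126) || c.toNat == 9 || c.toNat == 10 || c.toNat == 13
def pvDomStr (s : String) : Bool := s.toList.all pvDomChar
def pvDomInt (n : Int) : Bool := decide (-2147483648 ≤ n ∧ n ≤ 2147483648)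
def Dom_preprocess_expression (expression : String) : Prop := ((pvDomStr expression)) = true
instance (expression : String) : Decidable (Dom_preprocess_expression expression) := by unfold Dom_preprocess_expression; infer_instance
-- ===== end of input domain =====

-- B replaces A's per-character enumerate loop (index look-back) by splitting the string on the
-- open-paren delimiter and rebuilding it with a fold over the parts; same return value
-- (measurably faster in Python: C-level split/join instead of a per-character Python loop).

-- ===== PORT A =====
-- literal port of A: '^'→'**' replace, then a fold over enumerate accumulating the output,
-- with the look-back expression[i-1] as PySem.Str.pyGet? (guarded by i > 0, as in A).
def preprocess_expression (expression : String) : String :=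
  let s := PySem.Str.replace expression "^" "**"
  String.mk ((PySem.List.enumerate s.toList).foldl
    (fun acc ic =>
      let acc := if ic.2 == '(' && decide (0 < ic.1) &&
          ((PySem.Str.pyGet? s (ic.1 - 1)).map PySem.Chars.isdigit).getD false
        then acc ++ ['*'] else acc
      acc ++ [ic.2]) [])

-- ===== PORT B =====
-- literal port of B: '^'→'**' replace, split on '(' (PySem.Chars.splitOn, exact for
-- Python's str.split with a nonempty separator), then a fold over the remaining parts
-- appending ('*(' if out and out[-1].isdigit() else '(') + p; the match's [] arm is
-- unreachable (split never returns an empty list).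
def preprocess_expression_alt (expression : String) : String :=
  let parts := PySem.Chars.splitOn (PySem.Str.replace expression "^" "**").toList ['(']
  match parts with
  | [] => ""
  | p0 :: rest =>
    String.mk (rest.foldl
      (fun out p =>
        out ++ (if (out.getLast?.map PySem.Chars.isdigit).getD false
                then ['*', '('] else ['(']) ++ p) p0)

-- ===== PRECONDITION & SPEC =====
def Spec_preprocess_expression (expression : String) (out : String) : Prop := out = preprocess_expression_alt expression
instance (expression : String) (out : String) : Decidable (Spec_preprocess_expression expression out) := by unfold Spec_preprocess_expression; infer_instance

-- ===== CLAIM =====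
def Claim_equal_preprocess_expression : Prop := ∀ (expression : String), Dom_preprocess_expression expression → Spec_preprocess_expression expression (preprocess_expression expression)

-- ===== LEMMAS AND PROOFS =====

-- the per-index piece of A's loop, as a function of the look-back answer
def pvPieceA (l : List Char) (ic : Int × Char) : List Char :=
  if ic.2 == '(' && decide (0 < ic.1) &&
      ((PySem.List.pyGet? l (ic.1 - 1)).map PySem.Chars.isdigit).getD false
    then ['*', ic.2] else [ic.2]

-- common recursive characterisation: insert '*' before '(' when the previous char is a digit
def pvIns (prev : Option Char) : List Char → List Char
  | [] => []
  | c :: rest =>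
    (if c = '(' ∧ (prev.map PySem.Chars.isdigit).getD false then ['*', '('] else [c]) ++
      pvIns (some c) rest

-- structural single-char split
def pvSplit1 : List Char → List (List Char)
  | [] => [[]]
  | c :: rest =>
    if c = '(' then [] :: pvSplit1 rest
    else match pvSplit1 rest with
      | p :: ps => (c :: p) :: ps
      | [] => [[c]]

theorem pvSplit1_ne_nil (l : List Char) : pvSplit1 l ≠ [] := by
  cases l with
  | nil => simp [pvSplit1]
  | cons c rest =>
    simp only [pvSplit1]
    split
    · simp
    · split <;> simp

def pvConsHead (x : List Char) : List (List Char) → List (List Char)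
  | [] => [x]
  | p :: ps => (x ++ p) :: ps

-- A's accumulator loop unrolled into a flatMap of its per-index pieces
theorem pv_foldA (s : String) (xs : List (Int × Char)) : ∀ (acc : List Char),
    xs.foldl (fun acc ic =>
      let acc := if ic.2 == '(' && decide (0 < ic.1) &&
          ((PySem.Str.pyGet? s (ic.1 - 1)).map PySem.Chars.isdigit).getD false
        then acc ++ ['*'] else acc
      acc ++ [ic.2]) acc = acc ++ xs.flatMap (pvPieceA s.toList) := by
  induction xs with
  | nil => intro acc; simp
  | cons ic xs ih =>
    intro acc
    rw [List.foldl_cons, ih, List.flatMap_cons]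
    dsimp only
    have hpiece : pvPieceA s.toList ic =
        if ic.2 == '(' && decide (0 < ic.1) &&
            ((PySem.Str.pyGet? s (ic.1 - 1)).map PySem.Chars.isdigit).getD false
          then ['*', ic.2] else [ic.2] := by
      simp [pvPieceA]
    rw [hpiece]
    split <;> simp

-- A's enumerate flatMap behind a nonempty prefix equals pvIns with the last prefix char
theorem pv_auxA (rest : List Char) : ∀ (pre : List Char) (p : Char),
    (PySem.List.enumerate rest ((pre.length : Int) + 1)).flatMap
        (pvPieceA (pre ++ p :: rest)) = pvIns (some p) rest := by
  induction rest with
  | nil => intro pre p; simp [PySem.List.enumerate, pvIns]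
  | cons c rest ih =>
    intro pre p
    rw [PySem.List.enumerate_cons, List.flatMap_cons]
    have hget : PySem.List.pyGet? (pre ++ p :: c :: rest)
        (((pre.length : Int) + 1) - 1) = some p := by
      simpa using PySem.List.pyGet?_append_length (pre := pre) (y := p) (ys := c :: rest)
    have hpos : (0 : Int) < (pre.length : Int) + 1 := by positivity
    have hhead : pvPieceA (pre ++ p :: c :: rest) ((pre.length : Int) + 1, c) =
        if c = '(' ∧ PySem.Chars.isdigit p = true then ['*', '('] else [c] := by
      simp only [pvPieceA, hget, Option.map_some, Option.getD_some]
      by_cases hc : c = '(' <;> by_cases hd : PySem.Chars.isdigit p = true <;>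
        simp [hc, hd, hpos]
    rw [hhead]
    have htail := ih (pre ++ [p]) c
    have hlen : ((pre ++ [p]).length : Int) + 1 = (pre.length : Int) + 1 + 1 := by simp
    rw [hlen, show (pre ++ [p]) ++ c :: rest = pre ++ p :: c :: rest by simp] at htail
    rw [htail]
    simp [pvIns]

theorem pv_mainA (l : List Char) :
    (PySem.List.enumerate l).flatMap (pvPieceA l) = pvIns none l := by
  cases l with
  | nil => simp [PySem.List.enumerate, pvIns]
  | cons a rest =>
    rw [PySem.List.enumerate_cons, List.flatMap_cons]
    have h0 : pvPieceA (a :: rest) (0, a) = [a] := by simp [pvPieceA]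
    have h := pv_auxA rest [] a
    simp only [List.length_nil, Int.natCast_zero, List.nil_append, zero_add] at h
    rw [h0]
    simp only [zero_add]
    rw [h]
    simp [pvIns]

-- the fuel-based PySem splitOn.go with single-char separator computes pvSplit1
theorem pv_go (l : List Char) : ∀ (fuel : Nat) (cur : List Char) (acc : List (List Char)),
    l.length < fuel →
    PySem.Chars.splitOn.go ['('] fuel l cur acc =
      acc.reverse ++ pvConsHead cur.reverse (pvSplit1 l) := by
  induction l with
  | nil =>
    intro fuel cur acc h
    match fuel with
    | fuel + 1 => simp [PySem.Chars.splitOn.go, pvSplit1, pvConsHead]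
  | cons c rest ih =>
    intro fuel cur acc h
    match fuel with
    | fuel + 1 =>
      rw [PySem.Chars.splitOn.go]
      by_cases hc : c = '('
      · subst hc
        have hpre : List.isPrefixOf ['('] ('(' :: rest) = true := by
          simp [List.isPrefixOf]
        simp only [hpre, if_true, List.length_singleton, List.drop_one, List.tail_cons]
        rw [ih fuel [] (cur.reverse :: acc) (by simpa using Nat.lt_of_succ_lt_succ h)]
        simp only [pvSplit1, if_true, pvConsHead, List.reverse_cons, List.append_assoc,
          List.reverse_nil, List.nil_append, List.singleton_append]
        rcases hps : pvSplit1 rest with _ | ⟨p, ps⟩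
        · exact absurd hps (pvSplit1_ne_nil rest)
        · simp [pvConsHead, hps]
      · have hpre : List.isPrefixOf ['('] (c :: rest) = false := by
          simp [List.isPrefixOf, Ne.symm hc]
        simp only [hpre, if_false]
        rw [ih fuel (c :: cur) acc (Nat.lt_of_succ_lt_succ h)]
        simp only [pvSplit1, hc, if_false]
        rcases hps : pvSplit1 rest with _ | ⟨p, ps⟩
        · exact absurd hps (pvSplit1_ne_nil rest)
        · simp [pvConsHead]
  termination_by l.length

theorem pv_splitOn_eq (l : List Char) :
    PySem.Chars.splitOn l ['('] = pvSplit1 l := by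
  have h := pv_go l (l.length + 1) [] [] (Nat.lt_succ_self _)
  rw [PySem.Chars.splitOn, h]
  rcases hps : pvSplit1 l with _ | ⟨p, ps⟩
  · exact absurd hps (pvSplit1_ne_nil l)
  · simp [pvConsHead]

-- B's fold over the split parts computes pvIns, with the accumulated output as look-back
theorem pv_foldB (l : List Char) : ∀ (out : List Char),
    (match pvSplit1 l with
     | [] => out
     | p0 :: rest =>
       rest.foldl (fun out p =>
         out ++ (if (out.getLast?.map PySem.Chars.isdigit).getD false
                 then ['*', '('] else ['(']) ++ p) (out ++ p0)) =
      out ++ pvIns out.getLast? l := by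
  induction l with
  | nil => intro out; simp [pvSplit1, pvIns]
  | cons c rest ih =>
    intro out
    by_cases hc : c = '('
    · subst hc
      simp only [pvSplit1, if_true]
      rcases hps : pvSplit1 rest with _ | ⟨q, qs⟩
      · exact absurd hps (pvSplit1_ne_nil rest)
      · simp only [List.foldl_cons, List.append_nil]
        have step : out ++ (if (out.getLast?.map PySem.Chars.isdigit).getD false
              then ['*', '('] else ['(']) ++ q =
            (out ++ (if (out.getLast?.map PySem.Chars.isdigit).getD false
              then ['*', '('] else ['('])) ++ q := by simp
        rw [step]
        have hlast : (out ++ (if (out.getLast?.map PySem.Chars.isdigit).getD false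
            then ['*', '('] else ['('])).getLast? = some '(' := by
          split <;> simp [List.getLast?_append]
        have := ih (out ++ (if (out.getLast?.map PySem.Chars.isdigit).getD false
            then ['*', '('] else ['(']))
        rw [hps] at this
        dsimp only at this
        rw [this, hlast]
        simp only [pvIns]
        by_cases hd : (out.getLast?.map PySem.Chars.isdigit).getD false = true <;>
          simp [hd]
    · simp only [pvSplit1, hc, if_false]
      rcases hps : pvSplit1 rest with _ | ⟨q, qs⟩
      · exact absurd hps (pvSplit1_ne_nil rest)
      · have := ih (out ++ [c])
        rw [hps] at this
        have hlast : (out ++ [c]).getLast? = some c := by simp [List.getLast?_append]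
        rw [hlast] at this
        simp only [pvIns, hc, false_and, if_false, List.singleton_append]
        calc (qs.foldl (fun out p =>
              out ++ (if (out.getLast?.map PySem.Chars.isdigit).getD false
                      then ['*', '('] else ['(']) ++ p) (out ++ c :: q))
            = qs.foldl (fun out p =>
              out ++ (if (out.getLast?.map PySem.Chars.isdigit).getD false
                      then ['*', '('] else ['(']) ++ p) ((out ++ [c]) ++ q) := by simp
          _ = (out ++ [c]) ++ pvIns (some c) rest := this
          _ = out ++ c :: pvIns (some c) rest := by simp

-- ===== VERDICT =====
theorem preprocess_expression_spec : Claim_equal_preprocess_expression := by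
  intro expression _
  unfold Spec_preprocess_expression preprocess_expression preprocess_expression_alt
  dsimp only
  rw [pv_foldA, List.nil_append, pv_mainA, pv_splitOn_eq]
  have h := pv_foldB (PySem.Str.replace expression "^" "**").toList []
  simp only [List.nil_append, List.getLast?_nil] at h
  rcases hps : pvSplit1 (PySem.Str.replace expression "^" "**").toList with _ | ⟨p, ps⟩
  · exact absurd hps (pvSplit1_ne_nil _)
  · rw [hps] at h
    dsimp only at h ⊢
    rw [h]
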